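-- pv_equiv track=rewrite | github.com/shelkeom230/striver-DSA-bootcamp | binary search/hard.py | rowWithMax1Brute
-- ===== SOURCE A (Python) =====
-- def rowWithMax1Brute(mat):
--     n = len(mat)
--     m = len(mat[0])
--
--     maxIndx = -1
--     maxCount = 0
--     for i in range(n):
--         cnt = sum(mat[i])
--         if cnt > maxCount:
--             maxCount = cnt
--             maxIndx = i
--
--     return maxIndx
-- ===== SOURCE B (Python) =====
-- def rowWithMax1Brute(mat):
--     sums = [sum(row) for row in mat]
--     best = max(sums)
--     return sums.index(best) if best > 0 else -1
-- ===== Notes on version B (the rewrite author's own statement) =====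
-- stated objective: idiomatic
-- what changed: Replaces the manual running-max loop over indices with a sums list, a single max() call, and list.index for the first occurrence.
import Mathlib
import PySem

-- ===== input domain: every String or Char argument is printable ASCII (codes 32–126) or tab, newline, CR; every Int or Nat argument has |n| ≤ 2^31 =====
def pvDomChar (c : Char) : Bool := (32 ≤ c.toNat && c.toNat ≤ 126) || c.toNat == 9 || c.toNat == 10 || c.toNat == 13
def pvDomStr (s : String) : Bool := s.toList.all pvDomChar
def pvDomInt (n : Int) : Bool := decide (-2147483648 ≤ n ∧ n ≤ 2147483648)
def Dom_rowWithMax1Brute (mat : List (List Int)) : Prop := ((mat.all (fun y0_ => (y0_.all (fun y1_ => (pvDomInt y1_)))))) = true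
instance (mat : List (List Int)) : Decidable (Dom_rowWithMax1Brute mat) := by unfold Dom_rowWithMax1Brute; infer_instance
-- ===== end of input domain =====

-- B replaces A's manual running-max index loop by building the row-sums list once and
-- using max() plus list.index (first occurrence); same cost, idiomatic decomposition.

-- ===== PORT A =====
def rowWithMax1Brute (mat : List (List Int)) : Int :=
  let n := mat.length
  (((PySem.List.pyRange 0 n 1)).foldl
    (fun (st : Int × Int) (i : Int) =>
      let cnt := (PySem.List.pyGetD mat i []).sum
      if cnt > st.2 then (i, cnt) else st) (-1, 0)).1

-- ===== PORT B =====
def rowWithMax1Brute_alt (mat : List (List Int)) : Int :=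
  let sums := mat.map List.sum
  match PySem.List.max? sums (fun x => x) with
  | none => -1  -- max([]) raises ValueError in Python; excluded by Pre_
  | some best =>
      if best > 0 then (((PySem.List.index? sums best).getD 0 : Nat) : Int) else -1

-- ===== PRECONDITION & SPEC =====
-- A evaluates mat[0] (IndexError on []) and B calls max(sums) (ValueError on []), so the
-- empty matrix is excluded; Pre_ excludes nothing on which A returns a value.
def Pre_rowWithMax1Brute (mat : List (List Int)) : Prop := mat ≠ []
instance (mat : List (List Int)) : Decidable (Pre_rowWithMax1Brute mat) := by unfold Pre_rowWithMax1Brute; infer_instance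
def pvWitness_rowWithMax1Brute : List (List Int) := [[0, 1], [1, 1]]
def Spec_rowWithMax1Brute (mat : List (List Int)) (out : Int) : Prop := out = rowWithMax1Brute_alt mat
instance (mat : List (List Int)) (out : Int) : Decidable (Spec_rowWithMax1Brute mat out) := by unfold Spec_rowWithMax1Brute; infer_instance

-- ===== CLAIM (what is proved, stated in full; the proofs are below) =====
def Claim_equal_rowWithMax1Brute : Prop := ∀ (mat : List (List Int)), Dom_rowWithMax1Brute mat → Pre_rowWithMax1Brute mat → Spec_rowWithMax1Brute mat (rowWithMax1Brute mat)

-- ===== LEMMAS AND PROOFS =====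

-- max? of a cons, in terms of max? of the tail
lemma max?_id_cons_tail (x : Int) (t : List Int) :
    PySem.List.max? (x :: t) (fun y => y) =
      some (match PySem.List.max? t (fun y => y) with
            | none => x
            | some m => max x m) := by
  cases t with
  | nil => simp [PySem.List.max?]
  | cons r t' =>
      rw [PySem.List.max?_id_cons, PySem.List.max?_id_cons]
      dsimp only
      rw [List.foldl_cons, List.foldl_assoc]

-- the running-max loop of A, characterised by max? / index? of the sums list
lemma loop_spec (mat : List (List Int)) :
    ∀ (s bi bc : Int),
    (PySem.List.enumerate mat s).foldl
        (fun (st : Int × Int) (p : Int × List Int) =>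
          if p.2.sum > st.2 then (p.1, p.2.sum) else st) (bi, bc)
    = match PySem.List.max? (mat.map List.sum) (fun y => y) with
      | none => (bi, bc)
      | some M => if bc < M
          then (s + (((PySem.List.index? (mat.map List.sum) M).getD 0 : Nat) : Int), M)
          else (bi, bc) := by
  induction mat with
  | nil => intro s bi bc; simp [PySem.List.enumerate_nil, PySem.List.max?]
  | cons row rest ih =>
      intro s bi bc
      rw [PySem.List.enumerate_cons, List.foldl_cons]
      simp only [List.map_cons, max?_id_cons_tail]
      rcases hmr : PySem.List.max? (rest.map List.sum) (fun y => y) with _ | Mr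
      · -- rest = []
        have hrest : rest = [] := by
          have := (PySem.List.max?_eq_none_iff (xs := rest.map List.sum) (key := fun y => y)).mp hmr
          simpa using this
        subst hrest
        simp only [PySem.List.enumerate_nil, List.foldl_nil]
        by_cases h : row.sum > bc
        · simp [h]
        · simp [h]
      · -- rest has a max Mr
        have hMrMem : Mr ∈ rest.map List.sum := PySem.List.max?_mem hmr
        have hsome : (PySem.List.index? (rest.map List.sum) Mr).isSome := by
          rw [PySem.List.index?_isSome_iff]; exact hMrMem
        rcases Option.isSome_iff_exists.mp hsome with ⟨k, hk⟩
        by_cases hx : row.sum > bc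
        · rw [if_pos hx, ih (s + 1) s row.sum, hmr]
          dsimp only
          rw [hk]
          split_ifs with h1 h2 h2
          · have hne : row.sum ≠ Mr := ne_of_lt h1
            rw [max_eq_right (le_of_lt h1), PySem.List.index?_cons_of_ne _ hne, hk]
            simp only [Option.map_some, Option.getD_some, Option.getD_some, Prod.mk.injEq]
            constructor
            · push_cast; ring
            · trivial
          · exact absurd (lt_of_lt_of_le hx (le_max_left _ _)) h2
          · rw [max_eq_left (not_lt.mp h1), PySem.List.index?_cons_self]
            simp
          · exact absurd (lt_of_lt_of_le hx (le_max_left _ _)) h2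
        · rw [if_neg hx, ih (s + 1) bi bc, hmr]
          dsimp only
          rw [hk]
          have hxle : row.sum ≤ bc := not_lt.mp hx
          split_ifs with h1 h2 h2
          · have hlt : row.sum < Mr := lt_of_le_of_lt hxle h1
            rw [max_eq_right (le_of_lt hlt),
                PySem.List.index?_cons_of_ne _ (ne_of_lt hlt), hk]
            simp only [Option.map_some, Option.getD_some, Option.getD_some, Prod.mk.injEq]
            constructor
            · push_cast; ring
            · trivial
          · exact absurd (lt_of_lt_of_le h1 (le_max_right _ _)) h2
          · exact absurd h2 (not_lt.mpr (max_le hxle (not_lt.mp h1)))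
          · rfl

-- ===== VERDICT (by name: the statement is the Claim_ definition above) =====
theorem rowWithMax1Brute_spec : Claim_equal_rowWithMax1Brute := by
  intro mat _ _
  unfold Spec_rowWithMax1Brute rowWithMax1Brute rowWithMax1Brute_alt
  have hfold :
      (PySem.List.pyRange 0 (mat.length : Int) 1).foldl
        (fun (st : Int × Int) (i : Int) =>
          let cnt := (PySem.List.pyGetD mat i []).sum
          if cnt > st.2 then (i, cnt) else st) (-1, 0)
      = (PySem.List.enumerate mat 0).foldl
        (fun (st : Int × Int) (p : Int × List Int) =>
          if p.2.sum > st.2 then (p.1, p.2.sum) else st) (-1, 0) := by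
    rw [PySem.List.enumerate_eq_map_pyRange (d := []), List.foldl_map]
    simp [PySem.List.len_eq]
  simp only [hfold, loop_spec mat 0 (-1) 0]
  rcases hm : PySem.List.max? (mat.map List.sum) (fun y => y) with _ | M
  · rfl
  · by_cases h0 : (0 : Int) < M
    · simp [h0]
    · simp [h0]
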